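-- pv_equiv track=rewrite | github.com/ianhuang0630/FSMRNN | experiments/parentheses/embedded.py | nesting_level
-- ===== SOURCE A (Python) =====
-- def nesting_level(test):
--     """
--     Input:
--         test(list): list of input sequences
--     Returns:
--         levels (list): list of input sequences
--     """
--
--     levels = []
--     counter = 0
--
--     for element in test:
--         if element == "(":
--             counter += 1
--             levels.append(counter)
--
--         elif element == ")":
--             levels.append(counter)
--             counter -= 1
--
--         else:
--             levels.append(counter)
--
--     return levels
-- ===== SOURCE B (Python) =====
-- def nesting_level(test):
--     # pass 1: map each element to a depth delta
--     deltas = [1 if e == "(" else -1 if e == ")" else 0 for e in test]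
--     # pass 2: inclusive prefix sums of the deltas
--     s = []
--     tot = 0
--     for d in deltas:
--         tot += d
--         s.append(tot)
--     # pass 3: ')' is appended before its decrement in the source semantics -> adjust by +1
--     return [si + 1 if e == ")" else si for e, si in zip(test, s)]
-- ===== Notes on version B (the rewrite author's own statement) =====
-- stated objective: alternative
-- what changed: Replaces the single stateful counter loop with a three-pass pipeline: map elements to deltas, take inclusive prefix sums, then zip with a +1 adjustment on ')' to account for append-before-decrement.
import Mathlib
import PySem

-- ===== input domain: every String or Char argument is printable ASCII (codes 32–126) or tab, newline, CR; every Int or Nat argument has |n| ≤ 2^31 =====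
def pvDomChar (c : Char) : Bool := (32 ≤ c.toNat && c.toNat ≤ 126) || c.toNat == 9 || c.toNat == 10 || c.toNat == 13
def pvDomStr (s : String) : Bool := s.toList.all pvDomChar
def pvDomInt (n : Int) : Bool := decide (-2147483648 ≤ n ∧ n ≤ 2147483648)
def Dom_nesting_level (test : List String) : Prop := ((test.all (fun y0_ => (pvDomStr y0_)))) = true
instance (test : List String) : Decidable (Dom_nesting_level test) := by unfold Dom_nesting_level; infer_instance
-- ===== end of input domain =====

-- B replaces A's single stateful counter loop by delta-map + prefix-sum + a ')' adjustment pass (alternative decomposition, same cost).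


-- ===== PORT A =====
-- A: one loop over test keeping (levels, counter); '(' increments then appends, ')' appends then decrements.
def nesting_level (test : List String) : List Int :=
  (test.foldl (fun (st : List Int × Int) e =>
      if e = "(" then (st.1 ++ [st.2 + 1], st.2 + 1)
      else if e = ")" then (st.1 ++ [st.2], st.2 - 1)
      else (st.1 ++ [st.2], st.2)) ([], 0)).1

-- ===== PORT B =====
-- B: delta map, then the hand-written prefix-sum loop, then the zip-adjustment pass.
def nl_deltas (test : List String) : List Int :=
  test.map (fun e => if e = "(" then 1 else if e = ")" then -1 else 0)

def nl_prefix (st : List Int × Int) (ds : List Int) : List Int × Int :=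
  ds.foldl (fun st d => (st.1 ++ [st.2 + d], st.2 + d)) st

def nesting_level_alt (test : List String) : List Int :=
  List.zipWith (fun e si => if e = ")" then si + 1 else si) test
    (nl_prefix ([], 0) (nl_deltas test)).1

-- ===== PRECONDITION & SPEC =====
def Spec_nesting_level (test : List String) (out : List Int) : Prop := out = nesting_level_alt test
instance (test : List String) (out : List Int) : Decidable (Spec_nesting_level test out) := by unfold Spec_nesting_level; infer_instance

-- ===== CLAIM (what is proved, stated in full; the proofs are below) =====
def Claim_equal_nesting_level : Prop := ∀ (test : List String), Dom_nesting_level test → Spec_nesting_level test (nesting_level test)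

-- ===== LEMMAS AND PROOFS =====

-- reference levels: the list both programs compute, as a structural recursion
def nl_lv (c : Int) : List String → List Int
  | [] => []
  | e :: t =>
    if e = "(" then (c + 1) :: nl_lv (c + 1) t
    else if e = ")" then c :: nl_lv (c - 1) t
    else c :: nl_lv c t

theorem nl_foldA_eq (t : List String) : ∀ (acc : List Int) (c : Int),
    (t.foldl (fun (st : List Int × Int) e =>
      if e = "(" then (st.1 ++ [st.2 + 1], st.2 + 1)
      else if e = ")" then (st.1 ++ [st.2], st.2 - 1)
      else (st.1 ++ [st.2], st.2)) (acc, c)).1 = acc ++ nl_lv c t := by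
  induction t with
  | nil => simp [nl_lv]
  | cons e t ih =>
      intro acc c
      by_cases h1 : e = "("
      · simp [List.foldl_cons, h1, nl_lv, ih]
      · by_cases h2 : e = ")"
        · simp [List.foldl_cons, h2, nl_lv, ih]
        · simp [List.foldl_cons, h1, h2, nl_lv, ih]

theorem nl_prefix_shift (ds : List Int) : ∀ (s : List Int) (c : Int),
    (nl_prefix (s, c) ds).1 = s ++ (nl_prefix ([], c) ds).1 := by
  induction ds with
  | nil => simp [nl_prefix]
  | cons d ds ih =>
      intro s c
      have h1 := ih (s ++ [c + d]) (c + d)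
      have h2 := ih ([c + d]) (c + d)
      simp only [nl_prefix, List.foldl_cons, List.nil_append] at h1 h2 ⊢
      rw [h1, h2]
      simp

theorem nl_deltas_cons (e : String) (t : List String) :
    nl_deltas (e :: t) =
      (if e = "(" then 1 else if e = ")" then -1 else 0) :: nl_deltas t := rfl

theorem nl_prefix_cons (c d : Int) (ds : List Int) :
    (nl_prefix ([], c) (d :: ds)).1 = (c + d) :: (nl_prefix ([], c + d) ds).1 := by
  have h := nl_prefix_shift ds [c + d] (c + d)
  simp only [nl_prefix, List.foldl_cons, List.nil_append] at h ⊢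
  rw [h]
  rfl

theorem nl_alt_eq (t : List String) : ∀ (c : Int),
    List.zipWith (fun e si => if e = ")" then si + 1 else si) t
      (nl_prefix ([], c) (nl_deltas t)).1 = nl_lv c t := by
  induction t with
  | nil => intro c; simp [nl_deltas, nl_prefix, nl_lv]
  | cons e t ih =>
      intro c
      by_cases h1 : e = "("
      · subst h1
        simp [nl_deltas_cons, nl_prefix_cons, nl_lv, ih]
      · by_cases h2 : e = ")"
        · subst h2
          simp [nl_deltas_cons, nl_prefix_cons, nl_lv, ih, sub_eq_add_neg,
            neg_add_cancel_right]
        · simp [nl_deltas_cons, nl_prefix_cons, nl_lv, ih, h1, h2]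

-- ===== VERDICT (by name: the statement is the Claim_ definition above) =====
theorem nesting_level_spec : Claim_equal_nesting_level := by
  intro test _
  unfold Spec_nesting_level nesting_level nesting_level_alt
  rw [nl_foldA_eq, nl_alt_eq]
  simp
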